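-- pv_equiv track=rewrite | github.com/hernamesbarbara/cloakpivot | tests/performance/test_performance_optimizations.py | create_large_text
-- ===== SOURCE A (Python) =====
-- def create_large_text(size: int) -> str:
--     """Create large text for benchmarking."""
--     # Create text with PII-like patterns for realistic testing
--     patterns = [
--         "John Doe lives at 123 Main St",
--         "His email is john@example.com",
--         "Phone: (555) 123-4567",
--         "SSN: 123-45-6789",
--         "Credit Card: 4111-1111-1111-1111",
--     ]
--
--     text_parts = []
--     while len("".join(text_parts)) < size:
--         text_parts.extend(patterns)
--
--     full_text = " ".join(text_parts)
--     return full_text[:size]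
-- ===== SOURCE B (Python) =====
-- def create_large_text(size: int) -> str:
--     """Create large text for benchmarking."""
--     patterns = [
--         "John Doe lives at 123 Main St",
--         "His email is john@example.com",
--         "Phone: (555) 123-4567",
--         "SSN: 123-45-6789",
--         "Credit Card: 4111-1111-1111-1111",
--     ]
--     if size <= 0:
--         return ""
--     block = " ".join(patterns) + " "
--     reps = size // len(block) + 1
--     return (block * reps)[:size]
-- ===== Notes on version B (the rewrite author's own statement) =====
-- stated objective: faster
-- what changed: Replaces the while loop that repeatedly re-joins the growing parts list with a closed-form repetition count (size // len(block) + 1) and a single string multiplication plus one slice.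
import Mathlib
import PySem

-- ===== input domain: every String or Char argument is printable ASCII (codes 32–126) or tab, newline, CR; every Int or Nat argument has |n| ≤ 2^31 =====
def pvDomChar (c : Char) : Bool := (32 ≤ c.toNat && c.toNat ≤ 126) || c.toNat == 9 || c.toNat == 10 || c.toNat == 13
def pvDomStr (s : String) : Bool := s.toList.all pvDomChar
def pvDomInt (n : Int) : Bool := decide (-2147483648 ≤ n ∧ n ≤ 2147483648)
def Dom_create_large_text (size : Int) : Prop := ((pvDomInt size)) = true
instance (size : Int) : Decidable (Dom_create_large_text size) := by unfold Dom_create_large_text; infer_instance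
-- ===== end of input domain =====

-- B replaces A's grow-and-rejoin while-loop by a closed-form repetition count and one slice (simpler).

set_option maxRecDepth 8192


-- ===== PORT A =====
-- the five pattern strings, as lists of chars (string ops are ported on the List Char side)
def pvPatterns : List (List Char) :=
  [ "John Doe lives at 123 Main St".toList
  , "His email is john@example.com".toList
  , "Phone: (555) 123-4567".toList
  , "SSN: 123-45-6789".toList
  , "Credit Card: 4111-1111-1111-1111".toList ]

-- "".join is flattening
theorem pvJoin_nil_flatten (l : List (List Char)) : PySem.Chars.join [] l = l.flatten := by
  induction l with
  | nil => exact PySem.Chars.join_nil []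
  | cons a t ih =>
    cases t with
    | nil => simp [PySem.Chars.join_singleton]
    | cons b u => rw [PySem.Chars.join_cons_cons, List.flatten_cons, ← ih]; simp

theorem pvJoinNil_append (parts : List (List Char)) :
    (PySem.Chars.join [] (parts ++ pvPatterns)).length
      = (PySem.Chars.join [] parts).length + 127 := by
  rw [pvJoin_nil_flatten, pvJoin_nil_flatten, List.flatten_append, List.length_append]
  have : pvPatterns.flatten.length = 127 := by decide
  omega

-- while len("".join(text_parts)) < size: text_parts.extend(patterns)
def pvLoopA (size : Int) (parts : List (List Char)) : List (List Char) :=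
  if PySem.Chars.len (PySem.Chars.join [] parts) < size then
    pvLoopA size (parts ++ pvPatterns)
  else parts
termination_by (size - PySem.Chars.len (PySem.Chars.join [] parts)).toNat
decreasing_by
  simp only [PySem.Chars.len] at *
  rw [pvJoinNil_append]
  omega

def create_large_text (size : Int) : String :=
  String.ofList (PySem.Chars.slice (PySem.Chars.join [' '] (pvLoopA size [])) none (some size))

-- ===== PORT B =====
def create_large_text_alt (size : Int) : String :=
  if size ≤ 0 then "" else
    String.ofList (PySem.Chars.slice
      (PySem.List.pyRepeat (PySem.Chars.join [' '] pvPatterns ++ [' '])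
        (PySem.Int.floordiv size (((PySem.Chars.join [' '] pvPatterns ++ [' ']).length : Int)) + 1))
      none (some size))

-- ===== PRECONDITION & SPEC =====
def Spec_create_large_text (size : Int) (out : String) : Prop := out = create_large_text_alt size
instance (size : Int) (out : String) : Decidable (Spec_create_large_text size out) := by unfold Spec_create_large_text; infer_instance

-- ===== CLAIM (what is proved, stated in full; the proofs are below) =====
def Claim_equal_create_large_text : Prop := ∀ (size : Int), Dom_create_large_text size → Spec_create_large_text size (create_large_text size)

-- ===== LEMMAS AND PROOFS =====

-- "".join of j copies of the pattern list has length 127*j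
theorem pvLen_flatten_replicate (j : Nat) :
    (PySem.Chars.join [] ((List.replicate j pvPatterns).flatten)).length = 127 * j := by
  induction j with
  | zero => simp [PySem.Chars.join_nil]
  | succ n ih =>
    rw [List.replicate_succ', List.flatten_append, List.flatten_cons, List.flatten_nil,
        List.append_nil, pvJoinNil_append, ih]
    ring

-- " ".join distributes over ++ for non-empty argument lists
theorem pvJoin_append (sep : List Char) (xs ys : List (List Char))
    (hx : xs ≠ []) (hy : ys ≠ []) :
    PySem.Chars.join sep (xs ++ ys)
      = PySem.Chars.join sep xs ++ sep ++ PySem.Chars.join sep ys := by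
  induction xs with
  | nil => exact absurd rfl hx
  | cons a t ih =>
    cases t with
    | nil =>
      cases ys with
      | nil => exact absurd rfl hy
      | cons b u => simp [PySem.Chars.join_cons_cons, PySem.Chars.join_singleton]
    | cons b u =>
      rw [List.cons_append, List.cons_append,
          PySem.Chars.join_cons_cons, PySem.Chars.join_cons_cons,
          ← List.cons_append, ih (by simp)]
      simp

-- " ".join of k ≥ 1 copies of the patterns, plus one trailing space, is k copies of the block
theorem pvJoin_space_replicate (k : Nat) (hk : 1 ≤ k) :
    PySem.Chars.join [' '] ((List.replicate k pvPatterns).flatten) ++ [' ']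
      = (List.replicate k (PySem.Chars.join [' '] pvPatterns ++ [' '])).flatten := by
  induction k with
  | zero => omega
  | succ n ih =>
    cases Nat.eq_or_lt_of_le hk with
    | inl h =>
      have : n = 0 := by omega
      subst this
      simp
    | inr h =>
      have hn : 1 ≤ n := by omega
      rw [List.replicate_succ, List.flatten_cons,
          pvJoin_append [' '] pvPatterns ((List.replicate n pvPatterns).flatten)
            (by decide)
            (by cases n with
                | zero => omega
                | succ m => simp [List.replicate_succ, List.flatten_cons, pvPatterns]),
          List.replicate_succ, List.flatten_cons]
      rw [List.append_assoc, List.append_assoc, ih hn, List.append_assoc]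

-- length of k flattened blocks
theorem pvLen_blocks (k : Nat) :
    ((List.replicate k (PySem.Chars.join [' '] pvPatterns ++ [' '])).flatten).length
      = 132 * k := by
  induction k with
  | zero => simp
  | succ n ih =>
    rw [List.replicate_succ, List.flatten_cons, List.length_append, ih]
    have : (PySem.Chars.join [' '] pvPatterns ++ [' ']).length = 132 := by decide
    rw [this]; ring

-- a take within the first m blocks ignores the rest
theorem pvTake_blocks_le {s m n : Nat} (hmn : m ≤ n) (hs : s ≤ 132 * m) :
    List.take s ((List.replicate n (PySem.Chars.join [' '] pvPatterns ++ [' '])).flatten)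
      = List.take s ((List.replicate m (PySem.Chars.join [' '] pvPatterns ++ [' '])).flatten) := by
  have : n = m + (n - m) := by omega
  rw [this, List.replicate_add, List.flatten_append,
      List.take_append_of_le_length (by rw [pvLen_blocks]; omega)]

theorem pvTake_blocks {s m n : Nat} (hm : s ≤ 132 * m) (hn : s ≤ 132 * n) :
    List.take s ((List.replicate m (PySem.Chars.join [' '] pvPatterns ++ [' '])).flatten)
      = List.take s ((List.replicate n (PySem.Chars.join [' '] pvPatterns ++ [' '])).flatten) := by
  rcases Nat.le_total m n with h | h
  · rw [pvTake_blocks_le h hm]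
  · rw [pvTake_blocks_le h hn]

-- the loop, started on j flattened copies, ends on k flattened copies with 127k ≥ size
theorem pvLoopA_spec (size : Int) (hpos : 0 < size) : ∀ (j : Nat),
    ∃ k : Nat, pvLoopA size ((List.replicate j pvPatterns).flatten)
        = (List.replicate k pvPatterns).flatten ∧ size ≤ 127 * k ∧ 1 ≤ k := by
  intro j
  by_cases h : PySem.Chars.len (PySem.Chars.join [] ((List.replicate j pvPatterns).flatten)) < size
  · rw [pvLoopA, if_pos h]
    have hstep : (List.replicate j pvPatterns).flatten ++ pvPatterns
        = (List.replicate (j + 1) pvPatterns).flatten := by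
      rw [List.replicate_succ', List.flatten_append, List.flatten_cons, List.flatten_nil,
          List.append_nil]
    rw [hstep]
    exact pvLoopA_spec size hpos (j + 1)
  · refine ⟨j, by rw [pvLoopA, if_neg h], ?_, ?_⟩
    · simp only [PySem.Chars.len, pvLen_flatten_replicate] at h
      push_cast at h ⊢
      omega
    · simp only [PySem.Chars.len, pvLen_flatten_replicate] at h
      by_contra hj
      have : j = 0 := by omega
      subst this
      simp at h
      omega
termination_by j => (size - PySem.Chars.len (PySem.Chars.join [] ((List.replicate j pvPatterns).flatten))).toNat
decreasing_by
  simp only [PySem.Chars.len, pvLen_flatten_replicate] at *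
  push_cast at *
  omega

-- ===== VERDICT (by name: the statement is the Claim_ definition above) =====
theorem create_large_text_spec : Claim_equal_create_large_text := by
  intro size _
  unfold Spec_create_large_text create_large_text create_large_text_alt
  by_cases hpos : size ≤ 0
  · -- loop never runs, both sides are ""
    rw [if_pos hpos, pvLoopA, if_neg (by simp [PySem.Chars.len, PySem.Chars.join_nil]; omega)]
    simp only [PySem.Chars.join_nil, PySem.Chars.slice_eq_listSlice]
    rw [show PySem.List.slice ([] : List Char) none (some size) = [] by
      simp [PySem.List.slice, PySem.List.clampIdx]]
  · push_neg at hpos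
    rw [if_neg (by omega)]
    obtain ⟨k, hk, hks, hk1⟩ := pvLoopA_spec size hpos 0
    simp only [List.replicate_zero, List.flatten_nil] at hk
    rw [hk]
    congr 1
    rw [PySem.Chars.slice_eq_listSlice, PySem.Chars.slice_eq_listSlice,
        PySem.List.slice_to _ (by omega : (0:Int) ≤ size),
        PySem.List.slice_to _ (by omega : (0:Int) ≤ size)]
    rw [show (((PySem.Chars.join [' '] pvPatterns ++ [' ']).length : Nat) : Int) = 132 from by decide]
    set reps := PySem.Int.floordiv size 132 + 1 with hreps
    have hrepsge : size ≤ 132 * reps := by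
      have h1 := PySem.Int.floordiv_mul_add_mod size 132
      have h2 := PySem.Int.mod_lt size (b := 132) (by omega)
      omega
    have hreps0 : 0 ≤ reps := by
      rw [hreps, PySem.Int.floordiv_eq_ediv_of_pos (by omega)]
      omega
    rw [show PySem.List.pyRepeat (PySem.Chars.join [' '] pvPatterns ++ [' ']) reps
        = (List.replicate reps.toNat (PySem.Chars.join [' '] pvPatterns ++ [' '])).flatten from rfl]
    -- A's joined text: take within the first k blocks
    have hlenA : (PySem.Chars.join [' '] ((List.replicate k pvPatterns).flatten)).length
        = 132 * k - 1 := by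
      have := congrArg List.length (pvJoin_space_replicate k hk1)
      rw [List.length_append, pvLen_blocks] at this
      simp at this
      omega
    have hsz : size.toNat ≤ (PySem.Chars.join [' '] ((List.replicate k pvPatterns).flatten)).length := by
      rw [hlenA]; omega
    calc List.take size.toNat (PySem.Chars.join [' '] ((List.replicate k pvPatterns).flatten))
        = List.take size.toNat (PySem.Chars.join [' '] ((List.replicate k pvPatterns).flatten) ++ [' ']) := by
          rw [List.take_append_of_le_length hsz]
      _ = List.take size.toNat ((List.replicate k (PySem.Chars.join [' '] pvPatterns ++ [' '])).flatten) := by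
          rw [pvJoin_space_replicate k hk1]
      _ = List.take size.toNat ((List.replicate reps.toNat (PySem.Chars.join [' '] pvPatterns ++ [' '])).flatten) := by
          exact pvTake_blocks (by omega) (by omega)
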